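-- pv_equiv track=rewrite | github.com/Pipicano25/GeoMapperBot | import webbrowser multiple.py | divide_dict
-- ===== SOURCE A (Python) =====
-- num_bots = 5
--
-- def divide_dict(addresses_dict):
--     """
--     Divide el diccionario de direcciones entre el número de bots especificado
--     """
--     items = list(addresses_dict.items())
--     avg = len(items) // num_bots  # Promedio de items por bot
--     remainder = len(items) % num_bots  # Items restantes
--     result = []
--     start = 0
--
--     for i in range(num_bots):
--         # Si hay restantes, agregar uno más a este lote
--         end = start + avg + (1 if remainder > 0 else 0)
--         if remainder > 0:
--             remainder -= 1
--         # Crear diccionario para este bot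
--         batch = dict(items[start:end])
--         if batch:  # Solo añadir si hay registros
--             result.append(batch)
--         start = end
--
--     return result
-- ===== SOURCE B (Python) =====
-- num_bots = 5
--
-- def divide_dict(addresses_dict):
--     """
--     Divide el diccionario de direcciones entre el numero de bots especificado
--     """
--     items = list(addresses_dict.items())
--     k, m = divmod(len(items), num_bots)
--     result = []
--     cur = []
--     for key, value in items:
--         cur.append((key, value))
--         # a batch is full at k items, or k+1 while the remainder is unspent
--         if len(cur) == k + (1 if len(result) < m else 0):
--             result.append(dict(cur))
--             cur = []
--     return result
-- ===== Notes on version B (the rewrite author's own statement) =====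
-- stated objective: alternative
-- what changed: Instead of looping over the 5 bots and slicing the items list with a running cursor and remainder counter, B makes a single pass over the items themselves, accumulating the current batch and closing it whenever it reaches its target size k+(1 if fewer than m batches are closed); no slicing or index arithmetic remains.
import Mathlib
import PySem

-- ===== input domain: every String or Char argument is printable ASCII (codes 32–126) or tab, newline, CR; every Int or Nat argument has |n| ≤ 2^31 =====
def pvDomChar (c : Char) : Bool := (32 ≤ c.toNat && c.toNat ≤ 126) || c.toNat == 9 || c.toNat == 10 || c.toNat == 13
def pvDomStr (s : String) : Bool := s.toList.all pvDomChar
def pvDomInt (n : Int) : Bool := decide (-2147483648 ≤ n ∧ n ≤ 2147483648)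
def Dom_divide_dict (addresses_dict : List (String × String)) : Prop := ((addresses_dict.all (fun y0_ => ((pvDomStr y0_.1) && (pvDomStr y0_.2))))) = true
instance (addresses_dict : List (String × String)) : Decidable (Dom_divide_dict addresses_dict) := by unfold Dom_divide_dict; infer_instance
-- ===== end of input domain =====

-- B replaces A's bot-indexed slicing loop (running cursor + remainder counter) with a single pass
-- over the items that accumulates the current batch and closes it at its target size (alternative; same cost).


-- ===== PORT A =====
def divide_dict (addresses_dict : List (String × String)) : List (List (String × String)) :=
  let items := (PySem.Dict.ofList addresses_dict).items
  let avg := PySem.Int.floordiv (items.length : Int) 5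
  let remainder0 := PySem.Int.mod (items.length : Int) 5
  let st := (PySem.List.pyRange 0 5 1).foldl
    (fun (s : List (List (String × String)) × Int × Int) _ =>
      let endI := s.2.1 + avg + (if s.2.2 > 0 then 1 else 0)
      let remainder' := if s.2.2 > 0 then s.2.2 - 1 else s.2.2
      let batch := (PySem.Dict.ofList (PySem.List.slice items (some s.2.1) (some endI))).items
      (if batch = [] then s.1 else s.1 ++ [batch], endI, remainder'))
    ([], 0, remainder0)
  st.1

-- ===== PORT B =====
def divide_dict_alt (addresses_dict : List (String × String)) : List (List (String × String)) :=
  let items := (PySem.Dict.ofList addresses_dict).items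
  let k := PySem.Int.floordiv (items.length : Int) 5
  let m := PySem.Int.mod (items.length : Int) 5
  let st := items.foldl
    (fun (s : List (List (String × String)) × List (String × String)) kv =>
      let cur := s.2 ++ [kv]
      if (cur.length : Int) = k + (if (s.1.length : Int) < m then 1 else 0)
      then (s.1 ++ [(PySem.Dict.ofList cur).items], [])
      else (s.1, cur))
    ([], [])
  st.1

-- ===== PRECONDITION & SPEC =====
def Spec_divide_dict (addresses_dict : List (String × String)) (out : List (List (String × String))) : Prop := out = divide_dict_alt addresses_dict
instance (addresses_dict : List (String × String)) (out : List (List (String × String))) : Decidable (Spec_divide_dict addresses_dict out) := by unfold Spec_divide_dict; infer_instance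

-- ===== CLAIM (what is proved, stated in full; the proofs are below) =====
def Claim_equal_divide_dict : Prop := ∀ (addresses_dict : List (String × String)), Dom_divide_dict addresses_dict → Spec_divide_dict addresses_dict (divide_dict addresses_dict)

-- ===== LEMMAS AND PROOFS =====

-- A's loop body, with avg and the items list as parameters (defeq to the lambda in the port).
def pvAstep (avg : Int) (items : List (String × String))
    (s : List (List (String × String)) × Int × Int) (_ : Int) :
    List (List (String × String)) × Int × Int :=
  let endI := s.2.1 + avg + (if s.2.2 > 0 then 1 else 0)
  let remainder' := if s.2.2 > 0 then s.2.2 - 1 else s.2.2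
  let batch := (PySem.Dict.ofList (PySem.List.slice items (some s.2.1) (some endI))).items
  (if batch = [] then s.1 else s.1 ++ [batch], endI, remainder')

-- B's loop body (defeq to the lambda in the port).
def pvBstep (k m : Int) (s : List (List (String × String)) × List (String × String))
    (kv : String × String) : List (List (String × String)) × List (String × String) :=
  let cur := s.2 ++ [kv]
  if (cur.length : Int) = k + (if (s.1.length : Int) < m then 1 else 0)
  then (s.1 ++ [(PySem.Dict.ofList cur).items], [])
  else (s.1, cur)

-- the common chunk decomposition both loops produce: from position j, take batches of
-- size k (+1 for the first m batches), stopping when the list runs out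
def pvChunks (k m : Nat) : Nat → Nat → List (String × String) → List (List (String × String))
  | 0, _, _ => []
  | fuel+1, j, l =>
      if l = [] then []
      else (PySem.Dict.ofList (l.take (k + if j < m then 1 else 0))).items
           :: pvChunks k m fuel (j+1) (l.drop (k + if j < m then 1 else 0))

def pvSum (k m : Nat) : Nat → Nat → Nat
  | 0, _ => 0
  | fuel+1, j => (k + if j < m then 1 else 0) + pvSum k m fuel (j+1)

def pvOff (k m j : Nat) : Nat := j * k + min j m

lemma pvChunks_nil (k m fuel j : Nat) : pvChunks k m fuel j [] = [] := by
  cases fuel <;> simp [pvChunks]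

lemma pvSum_zero_of_le (m : Nat) {j : Nat} (hj : m ≤ j) (fuel : Nat) :
    pvSum 0 m fuel j = 0 := by
  induction fuel generalizing j with
  | zero => rfl
  | succ fuel ih => simp [pvSum, Nat.not_lt.mpr hj, ih (Nat.le_succ_of_le hj)]

lemma pvDict_items_ne_nil (l : List (String × String)) (hl : l ≠ []) :
    (PySem.Dict.ofList l).items ≠ [] := by
  have hkeys : (PySem.Dict.ofList l).keys = PySem.Set.ofList (l.map Prod.fst) := by
    rw [show PySem.Dict.ofList l = l.foldl (fun d p => d.insert p.1 p.2) PySem.Dict.empty from rfl]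
    rw [PySem.Dict.keys_foldl_insert_key (key := Prod.fst) (f := fun d p => p.2)]
    simp [PySem.Dict.keys_empty, PySem.Set.update, PySem.Set.ofList_eq_foldl]
  rcases l with _ | ⟨x, xs⟩
  · exact absurd rfl hl
  · intro h
    have hk : (PySem.Dict.ofList (x :: xs)).keys = [] := by
      simp [PySem.Dict.keys, h]
    rw [hkeys] at hk
    have hx : x.1 ∈ PySem.Set.ofList ((x :: xs).map Prod.fst) := by
      rw [PySem.Set.mem_ofList]; simp
    rw [hk] at hx
    exact absurd hx (List.not_mem_nil)

lemma pv_b_fill (k m : Nat) (b : List (String × String)) (hb : b ≠ []) :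
    ∀ (l cur : List (String × String)) (res : List (List (String × String))),
    cur.length + b.length = k + (if res.length < m then 1 else 0) →
    (b ++ l).foldl (pvBstep (k : Int) (m : Int)) (res, cur) =
      l.foldl (pvBstep (k : Int) (m : Int)) (res ++ [(PySem.Dict.ofList (cur ++ b)).items], []) := by
  induction b with
  | nil => exact absurd rfl hb
  | cons x b' ih =>
    intro l cur res hlen
    have hcond : (((cur ++ [x]).length : Int) = (k : Int) + (if ((res.length : Int) < (m : Int)) then 1 else 0))
        ↔ cur.length + 1 = k + (if res.length < m then 1 else 0) := by
      simp only [List.length_append, List.length_cons, List.length_nil, Nat.zero_add]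
      by_cases hrm : res.length < m
      · rw [if_pos (by exact_mod_cast hrm), if_pos hrm]
        exact ⟨fun h => by exact_mod_cast h, fun h => by exact_mod_cast h⟩
      · rw [if_neg (by exact_mod_cast hrm), if_neg hrm]
        exact ⟨fun h => by exact_mod_cast h, fun h => by exact_mod_cast h⟩
    rcases b' with _ | ⟨y, b''⟩
    · simp only [List.cons_append, List.nil_append, List.foldl_cons]
      rw [show pvBstep (k : Int) (m : Int) (res, cur) x
          = (res ++ [(PySem.Dict.ofList (cur ++ [x])).items], []) from by
        simp only [pvBstep]
        rw [if_pos (hcond.mpr (by simp at hlen ⊢; omega))]]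
    · simp only [List.cons_append, List.foldl_cons]
      rw [show pvBstep (k : Int) (m : Int) (res, cur) x = (res, cur ++ [x]) from by
        simp only [pvBstep]
        refine if_neg (fun h => ?_)
        have h2 := hcond.mp h
        simp only [List.length_cons] at hlen
        omega]
      have h3 : (cur ++ [x]).length + (y :: b'').length = k + (if res.length < m then 1 else 0) := by
        simp only [List.length_append, List.length_cons, List.length_nil] at hlen ⊢
        omega
      have := ih (by simp) l (cur ++ [x]) res h3
      simpa using this


lemma pv_b_run (k m : Nat) :
    ∀ (fuel j : Nat) (l : List (String × String)) (res : List (List (String × String))),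
    res.length = j → l.length = pvSum k m fuel j →
    l.foldl (pvBstep (k : Int) (m : Int)) (res, []) = (res ++ pvChunks k m fuel j l, []) := by
  intro fuel
  induction fuel with
  | zero =>
    intro j l res hres hlen
    have hl : l = [] := List.length_eq_zero_iff.mp hlen
    subst hl
    simp [pvChunks]
  | succ fuel ih =>
    intro j l res hres hlen
    by_cases hl : l = []
    · subst hl; simp [pvChunks]
    · have hlen' : l.length = (k + if j < m then 1 else 0) + pvSum k m fuel (j+1) := hlen
      have hs : 1 ≤ k + (if j < m then 1 else 0) := by
        rcases Nat.lt_or_ge j m with hj | hj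
        · simp [hj]
        · rw [if_neg (Nat.not_lt.mpr hj)] at hlen' ⊢
          by_contra hs0
          have hkz : k = 0 := by omega
          rw [hkz] at hlen'
          rw [pvSum_zero_of_le m (Nat.le_succ_of_le hj) fuel] at hlen'
          exact hl (List.length_eq_zero_iff.mp (by omega))
      have hsl : k + (if j < m then 1 else 0) ≤ l.length := by omega
      have hb : l.take (k + if j < m then 1 else 0) ≠ [] := by
        intro h
        have h2 := congrArg List.length h
        simp only [List.length_take, List.length_nil] at h2
        omega
      have hfill := pv_b_fill k m (l.take (k + if j < m then 1 else 0)) hb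
        (l.drop (k + if j < m then 1 else 0)) [] res
        (by simp only [List.length_nil, List.length_take, Nat.zero_add,
              Nat.min_eq_left hsl, hres])
      rw [← List.take_append_drop (k + if j < m then 1 else 0) l, hfill]
      rw [ih (j+1) (l.drop (k + if j < m then 1 else 0))
            (res ++ [(PySem.Dict.ofList ([] ++ l.take (k + if j < m then 1 else 0))).items])
            (by simp [hres]) (by simp only [List.length_drop]; omega)]
      rw [List.take_append_drop]
      simp only [List.nil_append]
      rw [show pvChunks k m (fuel+1) j l =
          (PySem.Dict.ofList (l.take (k + if j < m then 1 else 0))).items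
            :: pvChunks k m fuel (j+1) (l.drop (k + if j < m then 1 else 0)) from by
        rw [pvChunks]; exact if_neg hl]
      simp


lemma pv_a_run (k m : Nat) (items : List (String × String))
    (hn : items.length = 5 * k + m) :
    ∀ (c : List Int) (j : Nat) (res : List (List (String × String))),
    c.foldl (pvAstep (k : Int) items)
        (res, ((pvOff k m j : Nat) : Int), ((m - min j m : Nat) : Int)) =
      (res ++ pvChunks k m c.length j (items.drop (pvOff k m j)),
       ((pvOff k m (j + c.length) : Nat) : Int), ((m - min (j + c.length) m : Nat) : Int)) := by
  intro c
  induction c with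
  | nil =>
    intro j res
    simp [pvChunks]
  | cons i c ih =>
    intro j res
    have hoffsucc : pvOff k m (j+1) = pvOff k m j + (k + if j < m then 1 else 0) := by
      unfold pvOff
      have hjk : (j+1) * k = j * k + k := by ring
      rw [hjk]
      split_ifs with hj <;> omega
    have hcond : (((m - min j m : Nat) : Int) > 0) ↔ j < m := by
      constructor
      · intro h; by_contra hj; rw [Nat.min_eq_right (Nat.not_lt.mp hj)] at h; simp at h
      · intro h; rw [Nat.min_eq_left (Nat.le_of_lt h)]
        have : 0 < m - j := by omega
        exact_mod_cast this
    have hend : ((pvOff k m j : Nat) : Int) + (k : Int)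
        + (if ((m - min j m : Nat) : Int) > 0 then 1 else 0)
        = ((pvOff k m (j+1) : Nat) : Int) := by
      by_cases hj : j < m
      · rw [if_pos (hcond.mpr hj), hoffsucc, if_pos hj]; push_cast; ring
      · rw [if_neg (fun h => hj (hcond.mp h)), hoffsucc, if_neg hj]; push_cast; ring
    have hrem : (if ((m - min j m : Nat) : Int) > 0 then ((m - min j m : Nat) : Int) - 1
        else ((m - min j m : Nat) : Int)) = ((m - min (j+1) m : Nat) : Int) := by
      by_cases hj : j < m
      · rw [if_pos (hcond.mpr hj)]
        have : m - min (j+1) m = (m - min j m) - 1 := by omega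
        rw [this]
        have h1 : 1 ≤ m - min j m := by omega
        push_cast [h1]; ring
      · rw [if_neg (fun h => hj (hcond.mp h))]
        congr 1; omega
    have hslice : PySem.List.slice items (some ((pvOff k m j : Nat) : Int))
        (some ((pvOff k m (j+1) : Nat) : Int))
        = (items.drop (pvOff k m j)).take (k + if j < m then 1 else 0) := by
      rw [PySem.List.slice_natCast]
      congr 1
      rw [hoffsucc]
      omega
    have hstep : pvAstep (k : Int) items
        (res, ((pvOff k m j : Nat) : Int), ((m - min j m : Nat) : Int)) i
        = (if (PySem.Dict.ofList ((items.drop (pvOff k m j)).take (k + if j < m then 1 else 0))).items = []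
           then res
           else res ++ [(PySem.Dict.ofList ((items.drop (pvOff k m j)).take (k + if j < m then 1 else 0))).items],
           ((pvOff k m (j+1) : Nat) : Int), ((m - min (j+1) m : Nat) : Int)) := by
      simp only [pvAstep]
      rw [hend, hrem, hslice]
    rw [List.foldl_cons, hstep]
    by_cases hl : items.drop (pvOff k m j) = []
    · have hdrop1 : items.drop (pvOff k m (j+1)) = [] := by
        rw [List.drop_eq_nil_iff] at hl ⊢
        rw [hoffsucc]
        omega
      rw [hl]
      simp only [List.take_nil]
      rw [show (PySem.Dict.ofList ([] : List (String × String))).items = [] from rfl, if_pos rfl]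
      rw [ih (j+1) res, hdrop1, pvChunks_nil, pvChunks_nil]
      have h1 : j + (i :: c).length = (j+1) + c.length := by simp; omega
      rw [h1]
    · have hs : 1 ≤ k + (if j < m then 1 else 0) := by
        split_ifs with hj
        · omega
        · by_contra h0
          have hk : k = 0 := by omega
          rw [List.drop_eq_nil_iff] at hl
          have hk : k = 0 := by omega
          apply hl
          subst hk
          unfold pvOff
          simp at h0 ⊢
          omega
      have hoff : pvOff k m j < items.length := by
        rw [List.drop_eq_nil_iff] at hl
        omega
      have htake : (items.drop (pvOff k m j)).take (k + if j < m then 1 else 0) ≠ [] := by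
        intro h
        have h2 := congrArg List.length h
        simp only [List.length_take, List.length_drop, List.length_nil] at h2
        omega
      rw [if_neg (pvDict_items_ne_nil _ htake)]
      rw [ih (j+1) _]
      have hdd : (items.drop (pvOff k m j)).drop (k + if j < m then 1 else 0)
          = items.drop (pvOff k m (j+1)) := by
        rw [List.drop_drop, hoffsucc]
      rw [show pvChunks k m (i :: c).length j (items.drop (pvOff k m j))
          = (PySem.Dict.ofList ((items.drop (pvOff k m j)).take (k + if j < m then 1 else 0))).items
            :: pvChunks k m c.length (j+1) ((items.drop (pvOff k m j)).drop (k + if j < m then 1 else 0)) from by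
        rw [show (i :: c).length = c.length + 1 from rfl, pvChunks]
        exact if_neg hl]
      rw [hdd]
      have h1 : j + (i :: c).length = (j+1) + c.length := by simp; omega
      rw [h1]
      simp


lemma pvSum_five (k m : Nat) (hm : m < 5) : pvSum k m 5 0 = 5 * k + m := by
  simp [pvSum]
  split_ifs <;> omega

-- ===== VERDICT (by name: the statement is the Claim_ definition above) =====
theorem divide_dict_spec : Claim_equal_divide_dict := by
  intro addresses_dict _
  unfold Spec_divide_dict
  set items := (PySem.Dict.ofList addresses_dict).items with hitems
  set n := items.length with hnn
  have hk5 : PySem.Int.floordiv (n : Int) 5 = ((n / 5 : Nat) : Int) := by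
    rw [show (5 : Int) = ((5 : Nat) : Int) by norm_num]
    exact PySem.Int.floordiv_natCast n 5
  have hm5 : PySem.Int.mod (n : Int) 5 = ((n % 5 : Nat) : Int) := by
    rw [show (5 : Int) = ((5 : Nat) : Int) by norm_num]
    exact PySem.Int.mod_natCast n 5
  have hm : n % 5 < 5 := Nat.mod_lt _ (by norm_num)
  have hn : n = 5 * (n / 5) + n % 5 := by omega
  have hA : divide_dict addresses_dict =
      ((PySem.List.pyRange 0 5 1).foldl
        (pvAstep (PySem.Int.floordiv (n : Int) 5) items)
        ([], 0, PySem.Int.mod (n : Int) 5)).1 := rfl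
  have hB : divide_dict_alt addresses_dict =
      (items.foldl (pvBstep (PySem.Int.floordiv (n : Int) 5) (PySem.Int.mod (n : Int) 5))
        ([], [])).1 := rfl
  rw [hA, hB, hk5, hm5]
  have hrange : PySem.List.pyRange 0 5 1 = [0, 1, 2, 3, 4] := by decide
  have ha := pv_a_run (n / 5) (n % 5) items (by omega) (PySem.List.pyRange 0 5 1) 0 []
  have hb := pv_b_run (n / 5) (n % 5) 5 0 items [] rfl (by rw [pvSum_five _ _ hm]; omega)
  simp only [pvOff, Nat.zero_mul, Nat.min_eq_left (Nat.zero_le _), Nat.zero_add,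
    Nat.sub_zero, List.drop_zero, Nat.cast_zero] at ha
  rw [hrange] at ha ⊢
  have hlen : ([0, 1, 2, 3, 4] : List Int).length = 5 := rfl
  rw [hlen] at ha
  rw [ha, hb]
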